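-- pv_equiv track=rewrite | github.com/leejohy-0223/python-solve | python/algorithm_study/pro81302_2.py | check
-- ===== SOURCE A (Python) =====
-- def check(place):
--     for idxRow, row in enumerate(place):
--         for idxCol, cel in enumerate(row):
--             if cel != 'P':
--                 continue
--             if idxRow + 1 < 5 and place[idxRow + 1][idxCol] == 'P':
--                 return 0
--             if idxCol + 1 < 5 and place[idxRow][idxCol + 1] == 'P':
--                 return 0
--             if idxRow + 2 < 5 and place[idxRow + 2][idxCol] == 'P' and place[idxRow + 1][idxCol] != 'X':
--                 return 0
--             if idxCol + 2 < 5 and place[idxRow][idxCol + 2] == 'P' and place[idxRow][idxCol + 1] != 'X':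
--                 return 0
--             if idxRow + 1 < 5 and idxCol + 1 < 5 and place[idxRow + 1][idxCol + 1] == 'P' and (place[idxRow + 1][idxCol] != 'X' or place[idxRow][idxCol + 1] != 'X'):
--                 return 0
--             if idxRow - 1 >= 0 and idxCol + 1 < 5 and place[idxRow - 1][idxCol + 1] == 'P' and (place[idxRow - 1][idxCol] != 'X' or place[idxRow][idxCol + 1] != 'X'):
--                 return 0
--     return 1
-- ===== SOURCE B (Python) =====
-- def check(place):
--     # Collect the positions of all 'P's once, then test every ordered pair of
--     # them with one generic Manhattan-distance/midpoint-blocker rule.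
--     ps = [(r, c) for r, row in enumerate(place) for c, ch in enumerate(row) if ch == 'P']
--     for i in range(len(ps)):
--         r1, c1 = ps[i]
--         for j in range(i + 1, len(ps)):
--             r2, c2 = ps[j]
--             if (r2 - r1) + abs(c2 - c1) > 2:
--                 continue
--             if r1 == r2 and place[r1][(c1 + c2) // 2] == 'X':
--                 continue
--             if c1 == c2 and place[(r1 + r2) // 2][c1] == 'X':
--                 continue
--             if r1 != r2 and c1 != c2 and place[r1][c2] == 'X' and place[r2][c1] == 'X':
--                 continue
--             return 0
--     return 1
-- ===== Notes on version B (the rewrite author's own statement) =====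
-- stated objective: alternative
-- what changed: A scans every cell and tests six hard-coded relative offsets with per-offset blocker conditions; B first collects the list of 'P' positions, then scans every ordered pair of them once, deciding each pair by a generic Manhattan-distance<=2 rule with a floordiv midpoint blocker for collinear pairs and a two-corner blocker for diagonal pairs.
-- outside the precondition, e.g. on check(['....PP', '......', '......', '......', '......']): A returns 1, B returns 0; on check(['PP']): A raises IndexError, B returns 0
import Mathlib
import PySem

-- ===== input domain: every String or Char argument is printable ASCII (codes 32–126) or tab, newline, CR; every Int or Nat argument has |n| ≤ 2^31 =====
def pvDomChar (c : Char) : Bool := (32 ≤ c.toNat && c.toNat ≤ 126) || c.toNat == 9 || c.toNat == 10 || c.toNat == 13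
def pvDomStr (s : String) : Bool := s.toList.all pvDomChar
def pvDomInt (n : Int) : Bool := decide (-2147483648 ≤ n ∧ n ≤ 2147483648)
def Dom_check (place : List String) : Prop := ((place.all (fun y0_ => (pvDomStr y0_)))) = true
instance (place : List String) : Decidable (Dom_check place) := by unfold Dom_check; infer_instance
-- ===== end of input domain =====

-- B replaces A's per-cell scan with six hard-coded relative-offset checks by collecting the
-- 'P' positions once and testing every ordered pair with one generic distance/midpoint rule
-- (objective: alternative).

-- shared cell accessor place[r][c]; the '?' default is unreachable under Pre_check
-- (every index either program dereferences there is in range; Python raises out of range)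
def pvCell (place : List String) (r c : Int) : Char :=
  (((PySem.List.pyGet? place r).bind (fun row => PySem.Str.pyGet? row c)).getD '?')

-- ===== PORT A =====
-- body of A's inner loop at cell (r,c) holding character cel
def pvTrigA (place : List String) (r c : Int) (cel : Char) : Bool :=
  (cel == 'P') &&
  (  (decide (r + 1 < 5) && (pvCell place (r+1) c == 'P'))
  || (decide (c + 1 < 5) && (pvCell place r (c+1) == 'P'))
  || (decide (r + 2 < 5) && (pvCell place (r+2) c == 'P') && !(pvCell place (r+1) c == 'X'))
  || (decide (c + 2 < 5) && (pvCell place r (c+2) == 'P') && !(pvCell place r (c+1) == 'X'))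
  || (decide (r + 1 < 5) && decide (c + 1 < 5) && (pvCell place (r+1) (c+1) == 'P')
        && (!(pvCell place (r+1) c == 'X') || !(pvCell place r (c+1) == 'X')))
  || (decide (r - 1 ≥ 0) && decide (c + 1 < 5) && (pvCell place (r-1) (c+1) == 'P')
        && (!(pvCell place (r-1) c == 'X') || !(pvCell place r (c+1) == 'X'))) )

def check (place : List String) : Int :=
  if (PySem.List.enumerate place).any (fun p =>
       (PySem.List.enumerate p.2.toList).any (fun q => pvTrigA place p.1 q.1 q.2))
  then 0 else 1

-- ===== PORT B =====
-- the comprehension: positions (r, c) of all 'P' cells, in row-major order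
def pvPs (place : List String) : List (Int × Int) :=
  (PySem.List.enumerate place).flatMap (fun p =>
    (PySem.List.enumerate p.2.toList).filterMap
      (fun q => if q.2 == 'P' then some (p.1, q.1) else none))

-- body of B's inner loop: the pair test for P-cells (r1,c1), (r2,c2), as a continue-chain
def pvTrigB (place : List String) (r1 c1 r2 c2 : Int) : Bool :=
  !(decide ((r2 - r1) + |c2 - c1| > 2)) &&
  !(decide (r1 = r2) && (pvCell place r1 (PySem.Int.floordiv (c1 + c2) 2) == 'X')) &&
  !(decide (c1 = c2) && (pvCell place (PySem.Int.floordiv (r1 + r2) 2) c1 == 'X')) &&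
  !(decide (r1 ≠ r2) && decide (c1 ≠ c2) && (pvCell place r1 c2 == 'X') && (pvCell place r2 c1 == 'X'))

-- B's i/j index loops: element i against every later element, then the tail
def pvPairs (place : List String) : List (Int × Int) → Bool
  | [] => false
  | p :: rest => rest.any (fun q => pvTrigB place p.1 p.2 q.1 q.2) || pvPairs place rest

def check_alt (place : List String) : Int :=
  if pvPairs place (pvPs place) then 0 else 1

-- ===== PRECONDITION & SPEC =====
-- Pre_-side helpers: the list of 'P' positions, and the in-range test for the five
-- neighbour cells A probes around a lone 'P' (read row lengths, no algorithm re-run)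
def pvPPos (place : List String) : List (Nat × Nat) :=
  place.zipIdx.flatMap (fun sk =>
    sk.1.toList.zipIdx.filterMap (fun cj => if cj.1 = 'P' then some (sk.2, cj.2) else none))

def pvRowLen (place : List String) (i : Nat) : Nat := ((place[i]?).getD "").toList.length

def pvCellN (place : List String) (k j : Nat) : Char :=
  (((place[k]?).getD "").toList[j]?).getD ' '

def pvProbeOk (place : List String) (k j : Nat) : Bool :=
  (!decide (k+1 < 5) || (decide (k+1 < place.length) && decide (j < pvRowLen place (k+1)))) &&
  (!decide (j+1 < 5) || decide (j+1 < pvRowLen place k)) &&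
  (!decide (k+2 < 5) || (decide (k+2 < place.length) && decide (j < pvRowLen place (k+2)))) &&
  (!decide (j+2 < 5) || decide (j+2 < pvRowLen place k)) &&
  (!(decide (k+1 < 5) && decide (j+1 < 5)) || decide (j+1 < pvRowLen place (k+1))) &&
  (!(decide (1 ≤ k) && decide (j+1 < 5)) || decide (j+1 < pvRowLen place (k-1)))

-- Pre_ admits every grid with no 'P' (neither program indexes anything), every grid with
-- exactly one 'P' whose probed neighbour cells exist (both return 1), every grid whose
-- row-major-first 'P' has a 'P' directly below (rows 0..4) or directly to its right
-- (columns 0..4, the below-probe in range or skipped) — both return 0 at once — and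
-- the task's natural domain, the 5x5 grid. It excludes the remaining non-5x5 grids containing 'P':
-- A's hard-coded bound 5 makes it raise IndexError on most of those and silently skip
-- neighbours past row/column 4 on the rest, while B's natural pair scan raises or
-- reports the true violation there.
def Pre_check (place : List String) : Prop :=
  pvPPos place = [] ∨
  (∃ kj ∈ pvPPos place, pvPPos place = [kj] ∧ pvProbeOk place kj.1 kj.2 = true) ∨
  (∃ kj ∈ pvPPos place, (pvPPos place).head? = some kj ∧ kj.1 + 1 < 5 ∧
     kj.2 < pvRowLen place (kj.1 + 1) ∧ pvCellN place (kj.1 + 1) kj.2 = 'P') ∨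
  (∃ kj ∈ pvPPos place, (pvPPos place).head? = some kj ∧ kj.2 + 1 < 5 ∧
     kj.2 + 1 < pvRowLen place kj.1 ∧ pvCellN place kj.1 (kj.2 + 1) = 'P' ∧
     (¬ (kj.1 + 1 < 5) ∨ kj.2 < pvRowLen place (kj.1 + 1))) ∨
  (place.length = 5 ∧ ∀ s ∈ place, s.toList.length = 5)
instance (place : List String) : Decidable (Pre_check place) := by unfold Pre_check; infer_instance

def pvWitness_check : List String := ["P....", ".....", "...X.", "..P..", "....."]

def Spec_check (place : List String) (out : Int) : Prop := out = check_alt place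
instance (place : List String) (out : Int) : Decidable (Spec_check place out) := by unfold Spec_check; infer_instance

-- ===== CLAIM (what is proved, stated in full; the proofs are below) =====
def Claim_equal_check : Prop := ∀ (place : List String), Dom_check place → Pre_check place → Spec_check place (check place)

-- ===== LEMMAS AND PROOFS =====

-- "some P-cell of the grid triggers one of A's six offset checks"
def pvExA (place : List String) : Prop :=
  ∃ r c : Int, 0 ≤ r ∧ r < 5 ∧ 0 ≤ c ∧ c < 5 ∧ pvTrigA place r c (pvCell place r c) = true

-- "some row-major-ordered pair of P-cells passes B's pair test"
def pvExB (place : List String) : Prop :=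
  ∃ r1 c1 r2 c2 : Int, 0 ≤ r1 ∧ r1 < 5 ∧ 0 ≤ c1 ∧ c1 < 5 ∧ 0 ≤ r2 ∧ r2 < 5 ∧ 0 ≤ c2 ∧ c2 < 5 ∧
    (r1 < r2 ∨ (r1 = r2 ∧ c1 < c2)) ∧
    pvCell place r1 c1 = 'P' ∧ pvCell place r2 c2 = 'P' ∧ pvTrigB place r1 c1 r2 c2 = true

set_option maxHeartbeats 1000000 in
lemma pvTrigA_iff (place : List String) (r c : Int) (cel : Char) :
    pvTrigA place r c cel = true ↔ cel = 'P' ∧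
    ( (r + 1 < 5 ∧ pvCell place (r+1) c = 'P')
    ∨ (c + 1 < 5 ∧ pvCell place r (c+1) = 'P')
    ∨ (r + 2 < 5 ∧ pvCell place (r+2) c = 'P' ∧ pvCell place (r+1) c ≠ 'X')
    ∨ (c + 2 < 5 ∧ pvCell place r (c+2) = 'P' ∧ pvCell place r (c+1) ≠ 'X')
    ∨ (r + 1 < 5 ∧ c + 1 < 5 ∧ pvCell place (r+1) (c+1) = 'P'
        ∧ (pvCell place (r+1) c ≠ 'X' ∨ pvCell place r (c+1) ≠ 'X'))
    ∨ (1 ≤ r ∧ c + 1 < 5 ∧ pvCell place (r-1) (c+1) = 'P'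
        ∧ (pvCell place (r-1) c ≠ 'X' ∨ pvCell place r (c+1) ≠ 'X')) ) := by
  simp [pvTrigA]
  tauto

set_option maxHeartbeats 1000000 in
lemma pvTrigB_iff (place : List String) (r1 c1 r2 c2 : Int) :
    pvTrigB place r1 c1 r2 c2 = true ↔
    (r2 - r1) + |c2 - c1| ≤ 2 ∧
    ¬(r1 = r2 ∧ pvCell place r1 (PySem.Int.floordiv (c1 + c2) 2) = 'X') ∧
    ¬(c1 = c2 ∧ pvCell place (PySem.Int.floordiv (r1 + r2) 2) c1 = 'X') ∧
    ¬(r1 ≠ r2 ∧ c1 ≠ c2 ∧ pvCell place r1 c2 = 'X' ∧ pvCell place r2 c1 = 'X') := by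
  simp [pvTrigB, not_lt]
  tauto

lemma pvHalf (x : Int) : PySem.Int.floordiv (x + (x+1)) 2 = x := by
  rw [PySem.Int.floordiv_eq_ediv_of_pos (by omega)]; omega

lemma pvHalf2 (x : Int) : PySem.Int.floordiv (x + (x+2)) 2 = x + 1 := by
  rw [PySem.Int.floordiv_eq_ediv_of_pos (by omega)]; omega

lemma pvCell_eq (place : List String) (k j : Nat) (hk : k < place.length)
    (hj : j < place[k].toList.length) :
    pvCell place (k : Int) (j : Int) = place[k].toList[j] := by
  simp [pvCell, List.getElem?_eq_getElem hk, List.getElem?_eq_getElem hj]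

-- A's double loop fires iff some in-bounds cell triggers
lemma pvCondA (place : List String) (h1 : place.length = 5)
    (h2 : ∀ s ∈ place, s.toList.length = 5) :
    ((PySem.List.enumerate place).any (fun p =>
       (PySem.List.enumerate p.2.toList).any (fun q => pvTrigA place p.1 q.1 q.2)) = true)
    ↔ pvExA place := by
  rw [List.any_eq_true]
  constructor
  · rintro ⟨p, hp, hpa⟩
    rw [PySem.List.mem_enumerate_iff] at hp
    obtain ⟨k, hk, rfl⟩ := hp
    rw [List.any_eq_true] at hpa
    obtain ⟨q, hq, hqa⟩ := hpa
    rw [PySem.List.mem_enumerate_iff] at hq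
    obtain ⟨j, hj, rfl⟩ := hq
    simp only [zero_add] at hqa
    rw [← pvCell_eq place k j hk hj] at hqa
    refine ⟨(k:Int), (j:Int), by omega, ?_, by omega, ?_, hqa⟩
    · have := h1 ▸ hk; exact_mod_cast this
    · have := h2 place[k] (List.getElem_mem hk) ▸ hj; exact_mod_cast this
  · rintro ⟨r, c, hr0, hr5, hc0, hc5, ht⟩
    have hk : r.toNat < place.length := by omega
    have hj : c.toNat < place[r.toNat].toList.length := by
      have := h2 place[r.toNat] (List.getElem_mem hk); omega
    refine ⟨((0:Int) + (r.toNat : Int), place[r.toNat]), ?_, ?_⟩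
    · rw [PySem.List.mem_enumerate_iff]; exact ⟨r.toNat, hk, rfl⟩
    · rw [List.any_eq_true]
      refine ⟨((0:Int) + (c.toNat : Int), place[r.toNat].toList[c.toNat]), ?_, ?_⟩
      · rw [PySem.List.mem_enumerate_iff]; exact ⟨c.toNat, hj, rfl⟩
      · simp only [zero_add]
        rw [← pvCell_eq place r.toNat c.toNat hk hj]
        rw [Int.toNat_of_nonneg hr0, Int.toNat_of_nonneg hc0]
        exact ht

-- membership in the position list, shape-free
lemma pvMemPs (place : List String) (r c : Int) :
    (r, c) ∈ pvPs place ↔ ∃ (k : Nat) (hk : k < place.length) (j : Nat)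
      (hj : j < place[k].toList.length), r = (k:Int) ∧ c = (j:Int) ∧ place[k].toList[j] = 'P' := by
  simp only [pvPs, List.mem_flatMap, List.mem_filterMap]
  constructor
  · rintro ⟨p, hp, q, hq, hif⟩
    rw [PySem.List.mem_enumerate_iff] at hp
    obtain ⟨k, hk, rfl⟩ := hp
    rw [PySem.List.mem_enumerate_iff] at hq
    obtain ⟨j, hj, rfl⟩ := hq
    split at hif
    · rename_i hP
      simp only [zero_add, Option.some_inj, Prod.mk.injEq] at hif
      exact ⟨k, hk, j, hj, hif.1.symm, hif.2.symm, by simpa using hP⟩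
    · cases hif
  · rintro ⟨k, hk, j, hj, rfl, rfl, hP⟩
    refine ⟨((0:Int) + (k:Int), place[k]), ?_, ((0:Int) + (j:Int), place[k].toList[j]), ?_, ?_⟩
    · rw [PySem.List.mem_enumerate_iff]; exact ⟨k, hk, rfl⟩
    · rw [PySem.List.mem_enumerate_iff]; exact ⟨j, hj, rfl⟩
    · simp [hP]

-- membership in the position list on a 5x5 grid
lemma pvMemPs5 (place : List String) (h1 : place.length = 5)
    (h2 : ∀ s ∈ place, s.toList.length = 5) (r c : Int) :
    (r, c) ∈ pvPs place ↔
      0 ≤ r ∧ r < 5 ∧ 0 ≤ c ∧ c < 5 ∧ pvCell place r c = 'P' := by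
  rw [pvMemPs]
  constructor
  · rintro ⟨k, hk, j, hj, rfl, rfl, hP⟩
    have hb := h2 place[k] (List.getElem_mem hk)
    refine ⟨by omega, by exact_mod_cast h1 ▸ hk, by omega, by exact_mod_cast hb ▸ hj, ?_⟩
    rw [pvCell_eq place k j hk hj]; exact hP
  · rintro ⟨hr0, hr5, hc0, hc5, hP⟩
    have hk : r.toNat < place.length := by omega
    have hj : c.toNat < place[r.toNat].toList.length := by
      have := h2 place[r.toNat] (List.getElem_mem hk); omega
    refine ⟨r.toNat, hk, c.toNat, hj, by omega, by omega, ?_⟩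
    rw [← pvCell_eq place r.toNat c.toNat hk hj,
        Int.toNat_of_nonneg hr0, Int.toNat_of_nonneg hc0]
    exact hP

-- the position list is strictly row-major ordered
lemma pvPsPairwise (place : List String) :
    (pvPs place).Pairwise (fun p q => p.1 < q.1 ∨ (p.1 = q.1 ∧ p.2 < q.2)) := by
  rw [pvPs, List.pairwise_flatMap]
  constructor
  · intro a _
    rw [List.pairwise_filterMap]
    refine List.Pairwise.imp ?_ (PySem.List.pairwise_lt_enumerate a.2.toList 0)
    intro p q h b hb b' hb'
    split at hb
    · split at hb'
      · cases hb; cases hb'; exact Or.inr ⟨rfl, h⟩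
      · cases hb'
    · cases hb
  · refine List.Pairwise.imp ?_ (PySem.List.pairwise_lt_enumerate place 0)
    intro p q h x hx y hy
    rw [List.mem_filterMap] at hx hy
    obtain ⟨u, -, hu⟩ := hx
    obtain ⟨v, -, hv⟩ := hy
    split at hu
    · split at hv
      · cases hu; cases hv; exact Or.inl h
      · cases hv
    · cases hu

-- B's index loops fire iff some i < j pair of positions passes
lemma pvPairs_iff (place : List String) (l : List (Int × Int)) :
    pvPairs place l = true ↔ ∃ (i j : Nat) (hi : i < l.length) (hj : j < l.length),
      i < j ∧ pvTrigB place l[i].1 l[i].2 l[j].1 l[j].2 = true := by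
  induction l with
  | nil => simp [pvPairs]
  | cons p rest ih =>
    simp only [pvPairs, Bool.or_eq_true, List.any_eq_true, ih]
    constructor
    · rintro (⟨q, hq, ht⟩ | ⟨i, j, hi, hj, hij, ht⟩)
      · obtain ⟨j0, hj0, rfl⟩ := List.mem_iff_getElem.mp hq
        exact ⟨0, j0+1, by simp, by simp [hj0], by omega, by simpa using ht⟩
      · exact ⟨i+1, j+1, by simp [hi], by simp [hj], by omega, by simpa using ht⟩
    · rintro ⟨i, j, hi, hj, hij, ht⟩
      cases i with
      | zero =>
        cases j with
        | zero => omega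
        | succ j0 =>
          exact Or.inl ⟨rest[j0]'(by simpa using hj), List.getElem_mem _, by simpa using ht⟩
      | succ i0 =>
        cases j with
        | zero => omega
        | succ j0 =>
          exact Or.inr ⟨i0, j0, by simpa using hi, by simpa using hj, by omega, by simpa using ht⟩

-- B's whole scan on a 5x5 grid fires iff some ordered pair of P-cells passes
lemma pvCondB (place : List String) (h1 : place.length = 5)
    (h2 : ∀ s ∈ place, s.toList.length = 5) :
    pvPairs place (pvPs place) = true ↔ pvExB place := by
  rw [pvPairs_iff]
  constructor
  · rintro ⟨i, j, hi, hj, hij, ht⟩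
    have hpi := (pvMemPs5 place h1 h2 (pvPs place)[i].1 (pvPs place)[i].2).mp
      (by rw [Prod.mk.eta]; exact List.getElem_mem hi)
    have hpj := (pvMemPs5 place h1 h2 (pvPs place)[j].1 (pvPs place)[j].2).mp
      (by rw [Prod.mk.eta]; exact List.getElem_mem hj)
    have hlex := (List.pairwise_iff_getElem.mp (pvPsPairwise place)) i j hi hj hij
    exact ⟨(pvPs place)[i].1, (pvPs place)[i].2, (pvPs place)[j].1, (pvPs place)[j].2,
      hpi.1, hpi.2.1, hpi.2.2.1, hpi.2.2.2.1, hpj.1, hpj.2.1, hpj.2.2.1, hpj.2.2.2.1,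
      hlex, hpi.2.2.2.2, hpj.2.2.2.2, ht⟩
  · rintro ⟨r1, c1, r2, c2, hr10, hr15, hc10, hc15, hr20, hr25, hc20, hc25, hlex, hP1, hP2, ht⟩
    have hm1 : (r1, c1) ∈ pvPs place :=
      (pvMemPs5 place h1 h2 r1 c1).mpr ⟨hr10, hr15, hc10, hc15, hP1⟩
    have hm2 : (r2, c2) ∈ pvPs place :=
      (pvMemPs5 place h1 h2 r2 c2).mpr ⟨hr20, hr25, hc20, hc25, hP2⟩
    obtain ⟨i, hi, hpi⟩ := List.mem_iff_getElem.mp hm1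
    obtain ⟨j, hj, hpj⟩ := List.mem_iff_getElem.mp hm2
    have hij : i < j := by
      rcases Nat.lt_trichotomy i j with h | h | h
      · exact h
      · exfalso
        subst h
        have heq : ((r1, c1) : Int × Int) = (r2, c2) := hpi.symm.trans hpj
        simp only [Prod.mk.injEq] at heq
        omega
      · exfalso
        have := (List.pairwise_iff_getElem.mp (pvPsPairwise place)) j i hj hi h
        rw [hpi, hpj] at this
        simp only at this
        omega
    exact ⟨i, j, hi, hj, hij, by rw [hpi, hpj]; exact ht⟩

-- the combinatorial heart: A's six offsets ↔ B's ordered pairs at distance ≤ 2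
lemma pvExAB (place : List String) : pvExA place ↔ pvExB place := by
  constructor
  · rintro ⟨r, c, hr0, hr5, hc0, hc5, ht⟩
    obtain ⟨hP, hd⟩ := (pvTrigA_iff place r c _).mp ht
    rcases hd with ⟨h1,h2⟩|⟨h1,h2⟩|⟨h1,h2,h3⟩|⟨h1,h2,h3⟩|⟨h1,h2,h3,h4⟩|⟨h1,h2,h3,h4⟩
    · -- (1,0): P directly below
      refine ⟨r, c, r+1, c, hr0, hr5, hc0, hc5, by omega, by omega, hc0, hc5,
        by omega, hP, h2, ?_⟩
      rw [pvTrigB_iff]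
      refine ⟨by rw [show c - c = (0:Int) from by ring]; simp, ?_, ?_, ?_⟩
      · rintro ⟨he, -⟩; omega
      · rintro ⟨-, hx⟩; rw [pvHalf r] at hx; rw [hP] at hx; exact absurd hx (by decide)
      · rintro ⟨-, hcc, -⟩; exact hcc rfl
    · -- (0,1): P directly right
      refine ⟨r, c, r, c+1, hr0, hr5, hc0, hc5, hr0, hr5, by omega, by omega,
        by omega, hP, h2, ?_⟩
      rw [pvTrigB_iff]
      refine ⟨by rw [show c+1 - c = (1:Int) from by ring, show r - r = (0:Int) from by ring]; simp, ?_, ?_, ?_⟩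
      · rintro ⟨-, hx⟩; rw [pvHalf c] at hx; rw [hP] at hx; exact absurd hx (by decide)
      · rintro ⟨he, -⟩; omega
      · rintro ⟨hrr, -, -⟩; exact hrr rfl
    · -- (2,0): P two below, middle not X
      refine ⟨r, c, r+2, c, hr0, hr5, hc0, hc5, by omega, by omega, hc0, hc5,
        by omega, hP, h2, ?_⟩
      rw [pvTrigB_iff]
      refine ⟨by rw [show c - c = (0:Int) from by ring]; simp, ?_, ?_, ?_⟩
      · rintro ⟨he, -⟩; omega
      · rintro ⟨-, hx⟩; rw [pvHalf2 r] at hx; exact h3 hx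
      · rintro ⟨-, hcc, -⟩; exact hcc rfl
    · -- (0,2): P two right, middle not X
      refine ⟨r, c, r, c+2, hr0, hr5, hc0, hc5, hr0, hr5, by omega, by omega,
        by omega, hP, h2, ?_⟩
      rw [pvTrigB_iff]
      refine ⟨by rw [show c+2 - c = (2:Int) from by ring, show r - r = (0:Int) from by ring]; simp, ?_, ?_, ?_⟩
      · rintro ⟨-, hx⟩; rw [pvHalf2 c] at hx; exact h3 hx
      · rintro ⟨he, -⟩; omega
      · rintro ⟨hrr, -, -⟩; exact hrr rfl
    · -- (1,1): P down-right, a diagonal path open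
      refine ⟨r, c, r+1, c+1, hr0, hr5, hc0, hc5, by omega, by omega, by omega, by omega,
        by omega, hP, h3, ?_⟩
      rw [pvTrigB_iff]
      refine ⟨by rw [show c+1 - c = (1:Int) from by ring]; simp, ?_, ?_, ?_⟩
      · rintro ⟨he, -⟩; omega
      · rintro ⟨he, -⟩; omega
      · rintro ⟨-, -, hx1, hx2⟩
        rcases h4 with h | h
        · exact h hx2
        · exact h hx1
    · -- (-1,1) seen from the upper-right cell: pair ((r-1,c+1),(r,c))
      refine ⟨r-1, c+1, r, c, by omega, by omega, by omega, by omega, hr0, hr5, hc0, hc5,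
        by omega, h3, hP, ?_⟩
      rw [pvTrigB_iff]
      refine ⟨by rw [show c - (c+1) = (-1:Int) from by ring]; simp, ?_, ?_, ?_⟩
      · rintro ⟨he, -⟩; omega
      · rintro ⟨he, -⟩; omega
      · rintro ⟨-, -, hx1, hx2⟩
        rcases h4 with h | h
        · exact h hx1
        · exact h hx2
  · rintro ⟨r1, c1, r2, c2, hr10, hr15, hc10, hc15, hr20, hr25, hc20, hc25, hlex, hP1, hP2, ht⟩
    rw [pvTrigB_iff] at ht
    obtain ⟨hdist, hg1, hg2, hg3⟩ := ht
    have e1 := le_abs_self (c2 - c1)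
    have e2 := neg_le_abs (c2 - c1)
    have e3 := abs_nonneg (c2 - c1)
    have hcase : (r2 = r1 ∧ c2 = c1+1) ∨ (r2 = r1 ∧ c2 = c1+2) ∨ (r2 = r1+1 ∧ c2 = c1)
        ∨ (r2 = r1+2 ∧ c2 = c1) ∨ (r2 = r1+1 ∧ c2 = c1+1) ∨ (r2 = r1+1 ∧ c2 = c1-1) := by
      omega
    rcases hcase with ⟨hr, hc⟩|⟨hr, hc⟩|⟨hr, hc⟩|⟨hr, hc⟩|⟨hr, hc⟩|⟨hr, hc⟩
    · -- right neighbour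
      rw [hr, hc] at hP2
      refine ⟨r1, c1, hr10, hr15, hc10, hc15, ?_⟩
      rw [pvTrigA_iff]
      exact ⟨hP1, Or.inr (Or.inl ⟨by omega, hP2⟩)⟩
    · -- two right
      rw [hr, hc] at hP2
      refine ⟨r1, c1, hr10, hr15, hc10, hc15, ?_⟩
      rw [pvTrigA_iff]
      refine ⟨hP1, Or.inr (Or.inr (Or.inr (Or.inl ⟨by omega, hP2, ?_⟩)))⟩
      intro hx
      exact hg1 ⟨hr.symm, by rw [hc, pvHalf2 c1]; exact hx⟩
    · -- below
      rw [hr, hc] at hP2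
      refine ⟨r1, c1, hr10, hr15, hc10, hc15, ?_⟩
      rw [pvTrigA_iff]
      exact ⟨hP1, Or.inl ⟨by omega, hP2⟩⟩
    · -- two below
      rw [hr, hc] at hP2
      refine ⟨r1, c1, hr10, hr15, hc10, hc15, ?_⟩
      rw [pvTrigA_iff]
      refine ⟨hP1, Or.inr (Or.inr (Or.inl ⟨by omega, hP2, ?_⟩))⟩
      intro hx
      exact hg2 ⟨hc.symm, by rw [hr, pvHalf2 r1]; exact hx⟩
    · -- down-right diagonal
      rw [hr, hc] at hP2
      refine ⟨r1, c1, hr10, hr15, hc10, hc15, ?_⟩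
      rw [pvTrigA_iff]
      refine ⟨hP1, Or.inr (Or.inr (Or.inr (Or.inr (Or.inl ⟨by omega, by omega, hP2, ?_⟩))))⟩
      by_contra hx
      push Not at hx
      refine hg3 ⟨by omega, by omega, ?_, ?_⟩
      · rw [hc]; exact hx.2
      · rw [hr]; exact hx.1
    · -- down-left diagonal, seen from the lower cell as A's up-right check
      rw [hr, hc] at hP2
      refine ⟨r1+1, c1-1, by omega, by omega, by omega, by omega, ?_⟩
      rw [pvTrigA_iff]
      refine ⟨hP2, Or.inr (Or.inr (Or.inr (Or.inr (Or.inr ⟨by omega, by omega, ?_, ?_⟩))))⟩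
      · rw [show r1+1-1 = r1 from by ring, show c1-1+1 = c1 from by ring]; exact hP1
      · rw [show r1+1-1 = r1 from by ring, show c1-1+1 = c1 from by ring]
        by_contra hx
        push Not at hx
        refine hg3 ⟨by omega, by omega, ?_, ?_⟩
        · rw [hc]; exact hx.1
        · rw [hr]; exact hx.2

-- a grid with no 'P' makes A's scan silent
lemma pvNoPA (place : List String) (h : ∀ s ∈ place, 'P' ∉ s.toList) :
    ((PySem.List.enumerate place).any (fun p =>
       (PySem.List.enumerate p.2.toList).any (fun q => pvTrigA place p.1 q.1 q.2))) = false := by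
  rw [List.any_eq_false]
  rintro p hp
  rw [PySem.List.mem_enumerate_iff] at hp
  obtain ⟨k, hk, rfl⟩ := hp
  rw [Bool.not_eq_true, List.any_eq_false]
  rintro q hq
  rw [PySem.List.mem_enumerate_iff] at hq
  obtain ⟨j, hj, rfl⟩ := hq
  have hne : place[k].toList[j] ≠ 'P' := fun hc =>
    h place[k] (List.getElem_mem hk) (hc ▸ List.getElem_mem hj)
  simp [pvTrigA, hne]

-- a grid with no 'P' makes B's position list empty
lemma pvNoPB (place : List String) (h : ∀ s ∈ place, 'P' ∉ s.toList) :
    pvPairs place (pvPs place) = false := by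
  have hnil : pvPs place = [] := by
    rw [List.eq_nil_iff_forall_not_mem]
    rintro ⟨r, c⟩ hm
    rw [pvMemPs] at hm
    obtain ⟨k, hk, j, hj, -, -, hP⟩ := hm
    exact h place[k] (List.getElem_mem hk) (hP ▸ List.getElem_mem hj)
  rw [hnil]
  rfl

-- membership in the Pre_-side position list
lemma pvMemPPos (place : List String) (k j : Nat) :
    (k, j) ∈ pvPPos place ↔ ∃ (hk : k < place.length) (hj : j < place[k].toList.length),
      place[k].toList[j] = 'P' := by
  simp only [pvPPos, List.mem_flatMap, List.mem_filterMap]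
  constructor
  · rintro ⟨⟨s, k'⟩, hsk, ⟨ch, j'⟩, hcj, hif⟩
    rw [List.mk_mem_zipIdx_iff_getElem?] at hsk
    rw [List.mk_mem_zipIdx_iff_getElem?] at hcj
    split at hif
    · rename_i hP
      simp only [Option.some_inj, Prod.mk.injEq] at hif
      obtain ⟨rfl, rfl⟩ := hif
      obtain ⟨hk, rfl⟩ := List.getElem?_eq_some_iff.mp hsk
      obtain ⟨hj, rfl⟩ := List.getElem?_eq_some_iff.mp hcj
      exact ⟨hk, hj, hP⟩
    · cases hif
  · rintro ⟨hk, hj, hP⟩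
    refine ⟨(place[k], k), ?_, (place[k].toList[j], j), ?_, ?_⟩
    · rw [List.mk_mem_zipIdx_iff_getElem?]; exact List.getElem?_eq_getElem hk
    · rw [List.mk_mem_zipIdx_iff_getElem?]; exact List.getElem?_eq_getElem hj
    · simp [hP]

lemma pvNoPAll (place : List String) (h : pvPPos place = []) :
    ∀ s ∈ place, 'P' ∉ s.toList := by
  intro s hs hP
  obtain ⟨k, hk, rfl⟩ := List.mem_iff_getElem.mp hs
  obtain ⟨j, hj, hPj⟩ := List.mem_iff_getElem.mp hP
  have hm : ((k, j) : Nat × Nat) ∈ pvPPos place := (pvMemPPos place k j).mpr ⟨hk, hj, hPj⟩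
  rw [h] at hm
  cases hm

-- a cell reading 'P' through pvCell is a real in-range 'P'
lemma pvCellP (place : List String) (x y : Int) (hx : 0 ≤ x) (hy : 0 ≤ y)
    (h : pvCell place x y = 'P') :
    ((x.toNat, y.toNat) : Nat × Nat) ∈ pvPPos place := by
  rw [pvMemPPos]
  unfold pvCell at h
  rw [PySem.List.pyGet?_of_nonneg place hx] at h
  cases hrow : place[x.toNat]? with
  | none => rw [hrow] at h; simp at h
  | some row =>
    rw [hrow] at h
    obtain ⟨hk, hrow'⟩ := List.getElem?_eq_some_iff.mp hrow
    simp only [Option.bind_some] at h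
    rw [show PySem.Str.pyGet? row y = PySem.List.pyGet? row.toList y from by simp [pysem]] at h
    rw [PySem.List.pyGet?_of_nonneg row.toList hy] at h
    cases hc : row.toList[y.toNat]? with
    | none => rw [hc] at h; simp at h
    | some ch =>
      rw [hc] at h
      simp only [Option.getD_some] at h
      obtain ⟨hj, hch⟩ := List.getElem?_eq_some_iff.mp hc
      subst hrow'
      exact ⟨hk, hj, by rw [hch, h]⟩

-- with pvPPos = [(k0,j0)], any pvCell reading 'P' is at (k0,j0)
lemma pvUniqCell (place : List String) (k0 j0 : Nat) (h : pvPPos place = [(k0, j0)])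
    (x y : Int) (hx : 0 ≤ x) (hy : 0 ≤ y) (hP : pvCell place x y = 'P') :
    x = (k0:Int) ∧ y = (j0:Int) := by
  have hm := pvCellP place x y hx hy hP
  rw [h, List.mem_singleton] at hm
  simp only [Prod.mk.injEq] at hm
  omega

-- a lone 'P' triggers none of A's six checks
lemma pvUniqA (place : List String) (k0 j0 : Nat) (h : pvPPos place = [(k0, j0)]) :
    ((PySem.List.enumerate place).any (fun p =>
       (PySem.List.enumerate p.2.toList).any (fun q => pvTrigA place p.1 q.1 q.2))) = false := by
  rw [List.any_eq_false]
  rintro p hp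
  rw [PySem.List.mem_enumerate_iff] at hp
  obtain ⟨k, hk, rfl⟩ := hp
  rw [Bool.not_eq_true, List.any_eq_false]
  rintro q hq
  rw [PySem.List.mem_enumerate_iff] at hq
  obtain ⟨j, hj, rfl⟩ := hq
  simp only [zero_add]
  by_cases hc : place[k].toList[j] = 'P'
  · intro ht
    rw [← pvCell_eq place k j hk hj] at hc
    obtain ⟨hkk, hjj⟩ := pvUniqCell place k0 j0 h (k:Int) (j:Int) (by omega) (by omega) hc
    obtain ⟨-, hd⟩ := (pvTrigA_iff place (k:Int) (j:Int) _).mp ht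
    rcases hd with ⟨h1,h2⟩|⟨h1,h2⟩|⟨h1,h2,-⟩|⟨h1,h2,-⟩|⟨h1,h1',h2,-⟩|⟨h1,h1',h2,-⟩
    · obtain ⟨e1, e2⟩ := pvUniqCell place k0 j0 h _ _ (by omega) (by omega) h2; omega
    · obtain ⟨e1, e2⟩ := pvUniqCell place k0 j0 h _ _ (by omega) (by omega) h2; omega
    · obtain ⟨e1, e2⟩ := pvUniqCell place k0 j0 h _ _ (by omega) (by omega) h2; omega
    · obtain ⟨e1, e2⟩ := pvUniqCell place k0 j0 h _ _ (by omega) (by omega) h2; omega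
    · obtain ⟨e1, e2⟩ := pvUniqCell place k0 j0 h _ _ (by omega) (by omega) h2; omega
    · obtain ⟨e1, e2⟩ := pvUniqCell place k0 j0 h _ _ (by omega) (by omega) h2; omega
  · simp [pvTrigA, hc]

-- a lone 'P' gives B no pair to test
lemma pvUniqB (place : List String) (k0 j0 : Nat) (h : pvPPos place = [(k0, j0)]) :
    pvPairs place (pvPs place) = false := by
  rw [Bool.eq_false_iff]
  intro ht
  rw [pvPairs_iff] at ht
  obtain ⟨i, j, hi, hj, hij, -⟩ := ht
  have huniq : ∀ p ∈ pvPs place, p = (((k0:Int), (j0:Int)) : Int × Int) := by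
    rintro ⟨r, c⟩ hm
    rw [pvMemPs] at hm
    obtain ⟨k, hk, j', hj', rfl, rfl, hP⟩ := hm
    have hmm : ((k, j') : Nat × Nat) ∈ pvPPos place := (pvMemPPos place k j').mpr ⟨hk, hj', hP⟩
    rw [h, List.mem_singleton] at hmm
    simp only [Prod.mk.injEq] at hmm
    simp [hmm.1, hmm.2]
  have hlex := (List.pairwise_iff_getElem.mp (pvPsPairwise place)) i j hi hj hij
  rw [huniq _ (List.getElem_mem hi), huniq _ (List.getElem_mem hj)] at hlex
  simp at hlex

-- a 'P' with a 'P' directly below it (rows 0..3) fires both programs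
lemma pvBelowPair (place : List String) (k j : Nat)
    (hm : (k, j) ∈ pvPPos place) (hk5 : k + 1 < 5)
    (hlen : j < pvRowLen place (k+1)) (hP2 : pvCellN place (k+1) j = 'P') :
    ((PySem.List.enumerate place).any (fun p =>
       (PySem.List.enumerate p.2.toList).any (fun q => pvTrigA place p.1 q.1 q.2))) = true ∧
    pvPairs place (pvPs place) = true := by
  obtain ⟨hk, hj, hP1⟩ := (pvMemPPos place k j).mp hm
  have hk1 : k + 1 < place.length := by
    by_contra hcon
    rw [pvRowLen, List.getElem?_eq_none (by omega)] at hlen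
    simp at hlen
  have hj1 : j < place[k+1].toList.length := by
    rw [pvRowLen, List.getElem?_eq_getElem hk1] at hlen
    simpa using hlen
  have hP2' : place[k+1].toList[j] = 'P' := by
    rw [pvCellN, List.getElem?_eq_getElem hk1] at hP2
    simp only [Option.getD_some] at hP2
    rw [List.getElem?_eq_getElem hj1] at hP2
    simpa using hP2
  have hcast : ((k:Int) + 1) = ((k+1 : Nat) : Int) := by push_cast; ring
  have hCk : pvCell place (k:Int) (j:Int) = 'P' := by
    rw [pvCell_eq place k j hk hj]; exact hP1
  have hCk1 : pvCell place ((k:Int)+1) (j:Int) = 'P' := by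
    rw [hcast, pvCell_eq place (k+1) j hk1 hj1]; exact hP2'
  constructor
  · rw [List.any_eq_true]
    refine ⟨((0:Int) + (k:Int), place[k]), ?_, ?_⟩
    · rw [PySem.List.mem_enumerate_iff]; exact ⟨k, hk, rfl⟩
    · rw [List.any_eq_true]
      refine ⟨((0:Int) + (j:Int), place[k].toList[j]), ?_, ?_⟩
      · rw [PySem.List.mem_enumerate_iff]; exact ⟨j, hj, rfl⟩
      · simp only [zero_add]
        rw [pvTrigA_iff]
        exact ⟨hP1, Or.inl ⟨by omega, hCk1⟩⟩
  · have hm1 : (((k:Int), (j:Int)) : Int × Int) ∈ pvPs place :=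
      (pvMemPs place _ _).mpr ⟨k, hk, j, hj, rfl, rfl, hP1⟩
    have hm2 : ((((k+1:Nat):Int), (j:Int)) : Int × Int) ∈ pvPs place :=
      (pvMemPs place _ _).mpr ⟨k+1, hk1, j, hj1, rfl, rfl, hP2'⟩
    obtain ⟨i1, hi1, he1⟩ := List.mem_iff_getElem.mp hm1
    obtain ⟨i2, hi2, he2⟩ := List.mem_iff_getElem.mp hm2
    have hi12 : i1 < i2 := by
      rcases Nat.lt_trichotomy i1 i2 with h | h | h
      · exact h
      · exfalso
        subst h
        have heq := he1.symm.trans he2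
        simp only [Prod.mk.injEq] at heq
        omega
      · exfalso
        have hlex := (List.pairwise_iff_getElem.mp (pvPsPairwise place)) i2 i1 hi2 hi1 h
        rw [he1, he2] at hlex
        simp only at hlex
        omega
    rw [pvPairs_iff]
    refine ⟨i1, i2, hi1, hi2, hi12, ?_⟩
    rw [he1, he2]
    rw [pvTrigB_iff]
    refine ⟨?_, ?_, ?_, ?_⟩
    · simp
    · rintro ⟨hc, -⟩; omega
    · rintro ⟨-, hx⟩
      rw [show ((k:Int) + ((k+1:Nat):Int)) = (k:Int) + ((k:Int)+1) from by push_cast; ring,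
          pvHalf (k:Int)] at hx
      rw [hCk] at hx
      exact absurd hx (by decide)
    · rintro ⟨-, hc, -, -⟩; exact hc rfl

-- a 'P' with a 'P' directly to its right (columns 0..3) fires both programs
lemma pvRightPair (place : List String) (k j : Nat)
    (hm : (k, j) ∈ pvPPos place) (hj5 : j + 1 < 5)
    (hlen : j + 1 < pvRowLen place k) (hP2 : pvCellN place k (j+1) = 'P') :
    ((PySem.List.enumerate place).any (fun p =>
       (PySem.List.enumerate p.2.toList).any (fun q => pvTrigA place p.1 q.1 q.2))) = true ∧
    pvPairs place (pvPs place) = true := by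
  obtain ⟨hk, hj, hP1⟩ := (pvMemPPos place k j).mp hm
  have hj1 : j + 1 < place[k].toList.length := by
    rw [pvRowLen, List.getElem?_eq_getElem hk] at hlen
    simpa using hlen
  have hP2' : place[k].toList[j+1] = 'P' := by
    rw [pvCellN, List.getElem?_eq_getElem hk] at hP2
    simp only [Option.getD_some] at hP2
    rw [List.getElem?_eq_getElem hj1] at hP2
    simpa using hP2
  have hcast : ((j:Int) + 1) = ((j+1 : Nat) : Int) := by push_cast; ring
  have hCk : pvCell place (k:Int) (j:Int) = 'P' := by
    rw [pvCell_eq place k j hk hj]; exact hP1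
  have hCk1 : pvCell place (k:Int) ((j:Int)+1) = 'P' := by
    rw [hcast, pvCell_eq place k (j+1) hk hj1]; exact hP2'
  constructor
  · rw [List.any_eq_true]
    refine ⟨((0:Int) + (k:Int), place[k]), ?_, ?_⟩
    · rw [PySem.List.mem_enumerate_iff]; exact ⟨k, hk, rfl⟩
    · rw [List.any_eq_true]
      refine ⟨((0:Int) + (j:Int), place[k].toList[j]), ?_, ?_⟩
      · rw [PySem.List.mem_enumerate_iff]; exact ⟨j, hj, rfl⟩
      · simp only [zero_add]
        rw [pvTrigA_iff]
        exact ⟨hP1, Or.inr (Or.inl ⟨by omega, hCk1⟩)⟩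
  · have hm1 : (((k:Int), (j:Int)) : Int × Int) ∈ pvPs place :=
      (pvMemPs place _ _).mpr ⟨k, hk, j, hj, rfl, rfl, hP1⟩
    have hm2 : ((((k:Int)), ((j+1:Nat):Int)) : Int × Int) ∈ pvPs place :=
      (pvMemPs place _ _).mpr ⟨k, hk, j+1, hj1, rfl, rfl, hP2'⟩
    obtain ⟨i1, hi1, he1⟩ := List.mem_iff_getElem.mp hm1
    obtain ⟨i2, hi2, he2⟩ := List.mem_iff_getElem.mp hm2
    have hi12 : i1 < i2 := by
      rcases Nat.lt_trichotomy i1 i2 with h | h | h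
      · exact h
      · exfalso
        subst h
        have heq := he1.symm.trans he2
        simp only [Prod.mk.injEq] at heq
        omega
      · exfalso
        have hlex := (List.pairwise_iff_getElem.mp (pvPsPairwise place)) i2 i1 hi2 hi1 h
        rw [he1, he2] at hlex
        simp only at hlex
        omega
    rw [pvPairs_iff]
    refine ⟨i1, i2, hi1, hi2, hi12, ?_⟩
    rw [he1, he2]
    rw [pvTrigB_iff]
    refine ⟨?_, ?_, ?_, ?_⟩
    · rw [show (((j+1:Nat):Int) - (j:Int)) = 1 from by push_cast; ring]
      simp
    · rintro ⟨-, hx⟩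
      rw [show ((j:Int) + ((j+1:Nat):Int)) = (j:Int) + ((j:Int)+1) from by push_cast; ring,
          pvHalf (j:Int)] at hx
      rw [hCk] at hx
      exact absurd hx (by decide)
    · rintro ⟨hc, -⟩; omega
    · rintro ⟨hr, -, -, -⟩; exact hr rfl

-- ===== VERDICT (by name: the statement is the Claim_ definition above) =====
theorem check_spec : Claim_equal_check := by
  intro place _ hpre
  unfold Spec_check check check_alt
  rcases hpre with h0 | ⟨kj, -, hsing, -⟩ | ⟨kj, hmem, -, hk5, hlen, hP2⟩ |
    ⟨kj, hmem, -, hj5, hlen, hP2, -⟩ | ⟨h1, h2⟩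
  · have hnoP := pvNoPAll place h0
    rw [pvNoPA place hnoP, pvNoPB place hnoP]
  · have hsing' : pvPPos place = [(kj.1, kj.2)] := by rw [Prod.mk.eta]; exact hsing
    rw [pvUniqA place kj.1 kj.2 hsing', pvUniqB place kj.1 kj.2 hsing']
  · obtain ⟨hA, hB⟩ := pvBelowPair place kj.1 kj.2 hmem hk5 hlen hP2
    rw [hA, hB]
  · obtain ⟨hA, hB⟩ := pvRightPair place kj.1 kj.2 hmem hj5 hlen hP2
    rw [hA, hB]
  · have h := ((pvCondA place h1 h2).trans (pvExAB place)).trans (pvCondB place h1 h2).symm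
    split_ifs with hA hB <;> try rfl
    all_goals tauto
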